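-- pv_equiv track=rewrite | github.com/cardwing/Codes-for-Lane-Detection | ENet-TuSimple-Torch/pred_json.py | cutMax
-- ===== SOURCE A (Python) =====
-- def cutMax(lanes):
--     start = []
--     for lane in lanes:
--         s = [ k for k, x in enumerate(lane) if x>0 ][0]
--         start.append(s)
--     m = min(start)
--     if m < 350:
--         index1 = start.index(m)
--         reverse = start[:]
--         reverse.reverse()
--         index2 = reverse.index(m)
--         if index1 + index2 == len(start) - 1:
--             lanes[index1][m] = -2
--     return lanes
-- ===== SOURCE B (Python) =====
-- def cutMax(lanes):
--     # Single pass: track the smallest start, the first lane index achieving it,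
--     # and how many lanes tie for it (A's forward/backward index test == uniqueness).
--     # Mutates lanes in place like the original. Returns lanes unchanged when empty
--     # (the original raises ValueError there).
--     best = None  # (best_min, best_index, tie_count)
--     for i, lane in enumerate(lanes):
--         s = [k for k, x in enumerate(lane) if x > 0][0]
--         if best is None or s < best[0]:
--             best = (s, i, 1)
--         elif s == best[0]:
--             best = (best[0], best[1], best[2] + 1)
--     if best is not None:
--         m, idx, ties = best
--         if m < 350 and ties == 1:
--             lanes[idx][m] = -2
--     return lanes
-- ===== Notes on version B (the rewrite author's own statement) =====
-- stated objective: alternative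
-- what changed: Replaces the four passes over the start list (build, min, forward index, reverse+index) by one fused pass over lanes that maintains the running minimum, its first index and a tie count; the forward+backward index symmetry test becomes a uniqueness check (tie_count == 1).
-- outside the precondition, e.g. on cutMax([]): A raises ValueError, B returns []
import Mathlib
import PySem

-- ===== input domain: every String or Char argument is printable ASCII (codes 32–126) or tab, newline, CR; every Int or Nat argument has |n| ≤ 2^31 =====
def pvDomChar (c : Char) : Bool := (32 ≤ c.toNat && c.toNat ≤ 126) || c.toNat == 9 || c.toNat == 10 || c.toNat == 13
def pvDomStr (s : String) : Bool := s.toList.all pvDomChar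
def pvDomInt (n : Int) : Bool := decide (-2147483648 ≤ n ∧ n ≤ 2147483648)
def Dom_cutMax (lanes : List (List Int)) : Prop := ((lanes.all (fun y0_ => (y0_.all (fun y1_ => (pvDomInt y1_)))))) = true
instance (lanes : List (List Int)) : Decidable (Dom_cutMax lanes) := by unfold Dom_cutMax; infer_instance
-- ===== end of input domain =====

-- B fuses A's four passes over the start list into one accumulator pass over lanes;
-- the forward/backward index symmetry becomes a uniqueness (tie) count.  Both programs
-- mutate `lanes` in place in Python the same way; the proof is about the return value.

-- ===== PORT A =====
-- shared helper: `[k for k, x in enumerate(lane) if x > 0][0]` (headD 0: Python raises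
-- IndexError when no positive entry exists; Pre_ excludes those lanes)
def pvFirstPos (lane : List Int) : Int :=
  (((PySem.List.enumerate lane).filter (fun p => decide (0 < p.2))).map (fun p => p.1)).headD 0

def cutMax (lanes : List (List Int)) : List (List Int) :=
  -- start = []; for lane in lanes: start.append(s)
  let start := lanes.foldl (fun acc lane => acc ++ [pvFirstPos lane]) []
  match PySem.List.min? start (fun x => x) with
  | none => lanes          -- min([]) raises ValueError; excluded by Pre_
  | some m =>
    if m < 350 then
      match PySem.List.index? start m, PySem.List.index? start.reverse m with
      | some i1, some i2 =>
        if (i1 : Int) + (i2 : Int) = (start.length : Int) - 1 then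
          PySem.List.pySetD lanes (i1 : Int)
            (PySem.List.pySetD (PySem.List.pyGetD lanes (i1 : Int) []) m (-2))
        else lanes
      | _, _ => lanes      -- unreachable: m ∈ start
    else lanes

-- ===== PORT B =====
def pvBStep (b : Option (Int × Int × Nat)) (s : Int) (i : Int) : Option (Int × Int × Nat) :=
  match b with
  | none => some (s, i, 1)
  | some (bm, bi, t) =>
    if s < bm then some (s, i, 1)
    else if s = bm then some (bm, bi, t + 1)
    else some (bm, bi, t)

def cutMax_alt (lanes : List (List Int)) : List (List Int) :=
  let best := (PySem.List.enumerate lanes).foldl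
    (fun b p => pvBStep b (pvFirstPos p.2) p.1) none
  match best with
  | none => lanes
  | some (m, idx, ties) =>
    if m < 350 ∧ ties = 1 then
      PySem.List.pySetD lanes idx
        (PySem.List.pySetD (PySem.List.pyGetD lanes idx []) m (-2))
    else lanes

-- ===== PRECONDITION & SPEC =====
-- Pre_ excludes exactly the inputs where A raises: empty lanes (ValueError from min([]))
-- and any lane with no positive entry (IndexError from [...][0]).
def Pre_cutMax (lanes : List (List Int)) : Prop :=
  lanes ≠ [] ∧ ∀ lane ∈ lanes, ∃ x ∈ lane, 0 < x
instance (lanes : List (List Int)) : Decidable (Pre_cutMax lanes) := by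
  unfold Pre_cutMax; infer_instance

def pvWitness_cutMax : List (List Int) := [[0, 3, 1], [2, -1]]

def Spec_cutMax (lanes : List (List Int)) (out : List (List Int)) : Prop := out = cutMax_alt lanes
instance (lanes : List (List Int)) (out : List (List Int)) : Decidable (Spec_cutMax lanes out) := by unfold Spec_cutMax; infer_instance

-- ===== CLAIM (what is proved, stated in full; the proofs are below) =====
def Claim_equal_cutMax : Prop := ∀ (lanes : List (List Int)), Dom_cutMax lanes → Pre_cutMax lanes → Spec_cutMax lanes (cutMax lanes)

-- ===== LEMMAS AND PROOFS =====

theorem running_min_le (b : Int) (xs : List Int) : xs.foldl min b ≤ b := by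
  induction xs generalizing b with
  | nil => simp
  | cons x t ih => exact le_trans (ih (min b x)) (min_le_left b x)

theorem running_min_mem (b : Int) (xs : List Int) :
    xs.foldl min b = b ∨ xs.foldl min b ∈ xs := by
  induction xs generalizing b with
  | nil => simp
  | cons x t ih =>
    rcases ih (min b x) with h | h
    · rcases le_or_gt b x with hbx | hbx
      · left; simpa [min_eq_left hbx] using h
      · right
        simp only [List.foldl_cons]
        rw [h, min_eq_right hbx.le]
        simp
    · right; simp [List.foldl_cons, h]

-- the accumulator invariant of B's single pass
theorem bfold_spec (xs : List Int) (b bi : Int) (t : Nat) (k0 : Int) :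
    (PySem.List.enumerate xs k0).foldl (fun st p => pvBStep st p.2 p.1) (some (b, bi, t)) =
      some (xs.foldl min b,
            if xs.foldl min b < b then k0 + (xs.idxOf (xs.foldl min b) : Int) else bi,
            (if xs.foldl min b < b then 0 else t) + xs.count (xs.foldl min b)) := by
  induction xs generalizing b bi t k0 with
  | nil => simp [PySem.List.enumerate_nil]
  | cons x xs ih =>
    rw [PySem.List.enumerate_cons]
    by_cases hxb : x < b
    · have hmin : min b x = x := min_eq_right hxb.le
      simp only [List.foldl_cons]
      rw [show pvBStep (some (b, bi, t)) x k0 = some (x, k0, 1) from by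
        simp [pvBStep, hxb], ih]
      have hle : xs.foldl min x ≤ x := running_min_le x xs
      have hlt : xs.foldl min x < b := lt_of_le_of_lt hle hxb
      simp only [hmin]
      by_cases hx : xs.foldl min x < x
      · have hne : xs.foldl min x ≠ x := ne_of_lt hx
        simp [hx, hlt, hne.symm]
        omega
      · have heq : xs.foldl min x = x := le_antisymm hle (not_lt.mp hx)
        rw [heq]
        simp [hxb]
        omega
    · by_cases hxe : x = b
      · have hmin : min b x = b := min_eq_left (le_of_eq hxe.symm)
        simp only [List.foldl_cons]
        rw [show pvBStep (some (b, bi, t)) x k0 = some (b, bi, t + 1) from by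
          simp [pvBStep, hxe], ih]
        have hle : xs.foldl min b ≤ b := running_min_le b xs
        simp only [hmin]
        by_cases hx : xs.foldl min b < b
        · have hne : xs.foldl min b ≠ x := by rw [hxe]; exact ne_of_lt hx
          simp [hx, hne.symm]
          omega
        · have heq : xs.foldl min b = b := le_antisymm hle (not_lt.mp hx)
          simp [hx, heq, hxe, List.count_cons]
          omega
      · have hbx : b < x := lt_of_le_of_ne (not_lt.mp hxb) (Ne.symm hxe)
        have hmin : min b x = b := min_eq_left hbx.le
        simp only [List.foldl_cons]
        rw [show pvBStep (some (b, bi, t)) x k0 = some (b, bi, t) from by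
          simp [pvBStep, hxb, hxe], ih]
        have hle : xs.foldl min b ≤ b := running_min_le b xs
        simp only [hmin]
        have hne : xs.foldl min b ≠ x := ne_of_lt (lt_of_le_of_lt hle hbx)
        by_cases hx : xs.foldl min b < b
        · simp [hx, hne.symm]
          omega
        · simp [hx, hne.symm]

-- forward index + reverse index = len - 1  ⟺  the minimum is unique
theorem index_symm_iff_count_one (xs : List Int) (m : Int) (i r : Nat)
    (h1 : PySem.List.index? xs m = some i)
    (h2 : PySem.List.index? xs.reverse m = some r) :
    ((i : Int) + (r : Int) = (xs.length : Int) - 1 ↔ xs.count m = 1) := by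
  rw [PySem.List.index?_eq_some_iff] at h1 h2
  obtain ⟨pre, suf, hxs, hlen, hnp⟩ := h1
  obtain ⟨pre', suf', hxs', hlen', hnp'⟩ := h2
  have hxs2 : xs = suf'.reverse ++ m :: pre'.reverse := by
    have := congrArg List.reverse hxs'
    simpa [List.reverse_append] using this
  constructor
  · intro hsum
    have hlens : suf.length = pre'.length := by
      have l1 : xs.length = pre.length + suf.length + 1 := by simp [hxs]; omega
      omega
    have hdec : pre ++ m :: suf = suf'.reverse ++ m :: pre'.reverse := hxs ▸ hxs2
    have hlen2 : (m :: suf).length = (m :: pre'.reverse).length := by simp [hlens]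
    obtain ⟨-, htl⟩ := List.append_inj' hdec (by simpa using hlen2)
    have hsufe : suf = pre'.reverse := by simpa using htl
    have hns : m ∉ suf := by
      rw [hsufe]; simpa using hnp'
    subst hxs
    simp [List.count_append, List.count_cons_self,
      List.count_eq_zero_of_not_mem hnp, List.count_eq_zero_of_not_mem hns]
  · intro hc
    have hns : m ∉ suf := by
      intro hm
      have : 2 ≤ xs.count m := by
        subst hxs
        have h1 : 1 ≤ suf.count m := List.one_le_count_iff.mpr hm
        simp [List.count_append, List.count_cons_self]
        omega
      omega
    have hrev : xs.reverse = suf.reverse ++ m :: pre.reverse := by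
      simp [hxs, List.reverse_append]
    have hr2 : PySem.List.index? xs.reverse m = some suf.length := by
      rw [PySem.List.index?_eq_some_iff]
      exact ⟨suf.reverse, pre.reverse, hrev, by simp, by simpa using hns⟩
    have hr3 : PySem.List.index? xs.reverse m = some r := by
      rw [PySem.List.index?_eq_some_iff]; exact ⟨pre', suf', hxs', hlen', hnp'⟩
    have : r = suf.length := by
      have := hr3.symm.trans hr2
      simpa using this
    subst this
    have : xs.length = pre.length + suf.length + 1 := by simp [hxs]; omega
    omega

-- A's foldl-append loop builds `lanes.map pvFirstPos`
theorem start_eq_map (lanes : List (List Int)) :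
    lanes.foldl (fun acc lane => acc ++ [pvFirstPos lane]) [] = lanes.map pvFirstPos := by
  simpa using PySem.List.foldl_append_singleton_eq_map pvFirstPos lanes []

-- B's pass over lanes is the pass over the start values
theorem bfold_map (lanes : List (List Int)) (k0 : Int) (st : Option (Int × Int × Nat)) :
    (PySem.List.enumerate lanes k0).foldl (fun b p => pvBStep b (pvFirstPos p.2) p.1) st =
      (PySem.List.enumerate (lanes.map pvFirstPos) k0).foldl (fun b p => pvBStep b p.2 p.1) st := by
  induction lanes generalizing k0 st with
  | nil => simp [PySem.List.enumerate_nil]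
  | cons l t ih => simp [PySem.List.enumerate_cons, ih]

theorem index?_mem {xs : List Int} {m : Int} (h : m ∈ xs) :
    ∃ i, PySem.List.index? xs m = some i ∧ i = xs.idxOf m := by
  rcases ho : PySem.List.index? xs m with _ | i
  · exact absurd h ((PySem.List.index?_eq_none_iff xs m).mp ho)
  · refine ⟨i, rfl, ?_⟩
    have h2 : List.idxOf? m xs = some i := by
      simpa [PySem.List.index?_eq_idxOf?] using ho
    rw [List.idxOf_eq_getD_idxOf?, h2, Option.getD_some]

-- ===== VERDICT (by name: the statement is the Claim_ definition above) =====
theorem cutMax_spec : Claim_equal_cutMax := by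
  intro lanes _ hpre
  obtain ⟨hne, hpos⟩ := hpre
  unfold Spec_cutMax cutMax cutMax_alt
  rw [start_eq_map, bfold_map]
  cases lanes with
  | nil => exact absurd rfl hne
  | cons l0 t =>
    set xs := (l0 :: t).map pvFirstPos with hxs
    set v := pvFirstPos l0 with hv
    set rest := t.map pvFirstPos with hrest
    have hxs' : xs = v :: rest := by simp [hxs, hv, hrest]
    set m := rest.foldl min v with hm
    have hmin : PySem.List.min? xs (fun x => x) = some m := by
      rw [hxs']; exact PySem.List.min?_id_cons v rest
    have hmem : m ∈ xs := by
      rw [hxs']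
      rcases running_min_mem v rest with h | h
      · rw [← hm] at h; simp [h]
      · rw [← hm] at h; simp [h]
    have hrmem : m ∈ xs.reverse := by simpa using hmem
    obtain ⟨i1, hi1, hi1v⟩ := index?_mem hmem
    obtain ⟨i2, hi2, _⟩ := index?_mem hrmem
    -- B's fold result
    have hbf : (PySem.List.enumerate xs 0).foldl (fun b p => pvBStep b p.2 p.1) none =
        some (m, (xs.idxOf m : Int), xs.count m) := by
      rw [hxs', PySem.List.enumerate_cons, List.foldl_cons]
      show (PySem.List.enumerate rest 1).foldl (fun b p => pvBStep b p.2 p.1)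
        (pvBStep none v 0) = _
      rw [show pvBStep none v 0 = some (v, 0, 1) from rfl, bfold_spec]
      rw [← hm]
      have hle : m ≤ v := hm ▸ running_min_le v rest
      by_cases hlt : m < v
      · have hne' : m ≠ v := ne_of_lt hlt
        simp [hlt, hne'.symm]
        omega
      · have heq : m = v := le_antisymm hle (not_lt.mp hlt)
        simp [hlt, heq]
        omega
    dsimp only
    rw [hmin]
    dsimp only
    rw [hbf]
    dsimp only
    rw [hi1, hi2]
    have hiff := index_symm_iff_count_one xs m i1 i2 hi1 hi2
    by_cases h350 : m < 350
    · rw [if_pos h350]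
      dsimp only
      by_cases hcond : (i1 : Int) + (i2 : Int) = (xs.length : Int) - 1
      · rw [if_pos hcond, if_pos ⟨h350, hiff.mp hcond⟩, hi1v]
      · rw [if_neg hcond, if_neg (fun h => hcond (hiff.mpr h.2))]
    · rw [if_neg h350, if_neg (fun h => h350 h.1)]
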